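-- pv_equiv track=rewrite | github.com/stranske/Trend_Model_Project | scripts/build_autofix_pr_comment.py | _snapshot_code_lines
-- ===== SOURCE A (Python) =====
-- from typing import Any, Mapping, Sequence, cast
--
-- JsonMapping = Mapping[str, Any]
--
-- def coerce_int(value: object, default: int = 0) -> int:
--     if isinstance(value, bool):
--         return int(value)
--     if isinstance(value, (int, float)):
--         return int(value)
--     if isinstance(value, str):
--         try:
--             return int(value.strip())
--         except ValueError:
--             return default
--     return default
--
-- def _ensure_mapping(value: object) -> dict[str, Any]:
--     if isinstance(value, Mapping):
--         return dict(value)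
--     return {}
--
-- def _snapshot_code_lines(snapshot: JsonMapping | None) -> Sequence[str]:
--     mapping = _ensure_mapping(snapshot)
--     if not mapping:
--         return ()
--     sortable: list[tuple[str, int]] = []
--     for code, count in mapping.items():
--         sortable.append((str(code), coerce_int(count)))
--     sortable.sort(key=lambda item: (-item[1], item[0]))
--     if not sortable:
--         return ()
--     lines = ["", "## Current per-code counts"]
--     for code, count in sortable[:15]:
--         lines.append(f"- `{code}`: {count}")
--     return lines
-- ===== SOURCE B (Python) =====
-- from typing import Any, Mapping, Sequence
--
-- def coerce_int(value: object, default: int = 0) -> int: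
--     if isinstance(value, bool):
--         return int(value)
--     if isinstance(value, (int, float)):
--         return int(value)
--     if isinstance(value, str):
--         try:
--             return int(value.strip())
--         except ValueError:
--             return default
--     return default
--
-- def _ensure_mapping(value: object) -> dict[str, Any]:
--     if isinstance(value, Mapping):
--         return dict(value)
--     return {}
--
-- def _snapshot_code_lines(snapshot: "Mapping[str, Any] | None") -> Sequence[str]:
--     mapping = _ensure_mapping(snapshot)
--     if not mapping:
--         return ()
--     # bounded top-15 selection: keep a list of at most 15 items ordered by (count desc, code asc)
--     top: list[tuple[str, int]] = []
--     for code, count in mapping.items():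
--         item = (str(code), coerce_int(count))
--         i = 0
--         while i < len(top) and (top[i][1] > item[1] or (top[i][1] == item[1] and top[i][0] < item[0])):
--             i += 1
--         top.insert(i, item)
--         del top[15:]
--     return ["", "## Current per-code counts"] + [f"- `{code}`: {count}" for code, count in top]
-- ===== Notes on version B (the rewrite author's own statement) =====
-- stated objective: alternative
-- what changed: Replaces full sort(key=(-count,code)) followed by [:15] with a single-pass bounded top-15 selection that maintains an ordered list of at most 15 items by position-scan insertion and truncation, and builds the lines with a list comprehension instead of an append loop.
import Mathlib
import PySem

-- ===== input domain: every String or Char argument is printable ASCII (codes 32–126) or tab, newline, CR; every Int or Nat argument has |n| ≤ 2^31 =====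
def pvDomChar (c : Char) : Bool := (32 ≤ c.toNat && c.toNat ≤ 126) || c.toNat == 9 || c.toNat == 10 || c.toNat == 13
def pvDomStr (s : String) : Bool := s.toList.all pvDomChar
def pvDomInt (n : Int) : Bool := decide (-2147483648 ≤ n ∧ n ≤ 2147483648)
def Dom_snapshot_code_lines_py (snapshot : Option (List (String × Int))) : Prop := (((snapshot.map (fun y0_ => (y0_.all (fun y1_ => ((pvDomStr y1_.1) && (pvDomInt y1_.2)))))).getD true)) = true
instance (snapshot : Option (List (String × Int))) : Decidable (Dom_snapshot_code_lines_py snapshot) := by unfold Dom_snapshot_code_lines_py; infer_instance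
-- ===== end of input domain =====

-- B replaces the full sort + [:15] slice by a one-pass bounded top-15 ordered insertion (alternative decomposition, same results).

-- ===== PORT A =====
-- coerce_int: here the value is always an Int (the dict's values), so only the
-- `isinstance(value, (int, float))` branch fires and int(value) = value; the bool/str
-- branches are unreachable on this typed domain. `default` is kept as a parameter.
def coerce_int_py (value : Int) (_default : Int) : Int := value

-- _ensure_mapping: `snapshot` is a Mapping or None; dict(mapping) keeps first-insertion
-- key order with the (unique) values — PySem.Dict.ofList. None gives {} (ofList []).
def ensure_mapping_py (snapshot : Option (List (String × Int))) : PySem.Dict String Int :=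
  PySem.Dict.ofList (snapshot.getD [])

def snapshot_code_lines_py (snapshot : Option (List (String × Int))) : List String :=
  let mapping := ensure_mapping_py snapshot
  if mapping.items = [] then []
  else
    -- for code, count in mapping.items(): sortable.append((str(code), coerce_int(count)))
    let sortable := mapping.items.foldl
      (fun acc p => acc ++ [(p.1, coerce_int_py p.2 0)]) ([] : List (String × Int))
    -- sortable.sort(key=lambda item: (-item[1], item[0]))
    let sortable := PySem.List.sorted2 sortable (fun it => -it.2) (fun it => it.1)
    if sortable = [] then []
    else
      let lines := ["", "## Current per-code counts"]
      let lines := (PySem.List.slice sortable none (some 15)).foldl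
        (fun acc p => acc ++ ["- `" ++ p.1 ++ "`: " ++ PySem.Int.toStr p.2]) lines
      lines

-- ===== PORT B =====
-- the position scan + insert of Source B: walk past the items that stay ahead of `item`
-- (bigger count, or same count and smaller code), then insert `item` there
def pvInsertTop (item : String × Int) (top : List (String × Int)) : List (String × Int) :=
  match top with
  | [] => [item]
  | h :: t =>
    if h.2 > item.2 ∨ (h.2 = item.2 ∧ h.1 < item.1) then h :: pvInsertTop item t
    else item :: h :: t

def snapshot_code_lines_py_alt (snapshot : Option (List (String × Int))) : List String :=
  let mapping := ensure_mapping_py snapshot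
  if mapping.items = [] then []
  else
    -- bounded top-15 selection: insert each item in order, then `del top[15:]`
    let top := mapping.items.foldl
      (fun top p => (pvInsertTop (p.1, coerce_int_py p.2 0) top).take 15)
      ([] : List (String × Int))
    ["", "## Current per-code counts"] ++
      top.map (fun p => "- `" ++ p.1 ++ "`: " ++ PySem.Int.toStr p.2)

-- ===== PRECONDITION & SPEC =====
def Spec_snapshot_code_lines_py (snapshot : Option (List (String × Int))) (out : List String) : Prop := out = snapshot_code_lines_py_alt snapshot
instance (snapshot : Option (List (String × Int))) (out : List String) : Decidable (Spec_snapshot_code_lines_py snapshot out) := by unfold Spec_snapshot_code_lines_py; infer_instance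

-- ===== CLAIM (what is proved, stated in full; the proofs are below) =====
def Claim_equal_snapshot_code_lines_py : Prop := ∀ (snapshot : Option (List (String × Int))), Dom_snapshot_code_lines_py snapshot → Spec_snapshot_code_lines_py snapshot (snapshot_code_lines_py snapshot)

-- ===== LEMMAS AND PROOFS =====

-- the comparison sorted2 uses for key (-count, code)
def pvBefore (a b : String × Int) : Bool :=
  decide (-a.2 < -b.2) || (!decide (-b.2 < -a.2) && decide (a.1 < b.1))

theorem pvInsertTop_cons (p h : String × Int) (t : List (String × Int)) :
    pvInsertTop p (h :: t)
      = if h.2 > p.2 ∨ (h.2 = p.2 ∧ h.1 < p.1) then h :: pvInsertTop p t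
        else p :: h :: t := rfl

theorem pvInsertBy_cons {α : Type} (b : α → α → Bool) (x h : α) (t : List α) :
    PySem.List.insertBy b x (h :: t)
      = if b x h then x :: h :: t else h :: PySem.List.insertBy b x t := rfl

-- truncating before or after an insertion makes no difference
theorem pvInsertTop_take (p : String × Int) :
    ∀ (s : List (String × Int)) (k : Nat),
      (pvInsertTop p (s.take k)).take k = (pvInsertTop p s).take k := by
  intro s
  induction s with
  | nil => intro k; simp
  | cons h t ih =>
    intro k
    cases k with
    | zero => simp
    | succ k =>
      rw [List.take_succ_cons, pvInsertTop_cons, pvInsertTop_cons]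
      split_ifs with hcond
      · simp [ih k]
      · cases k with
        | zero => simp
        | succ m => simp [List.take_take]

-- the bounded fold is the truncation of the unbounded insertion fold
theorem pvFold_take (L : List (String × Int)) :
    ∀ (s : List (String × Int)),
      L.foldl (fun a p => (pvInsertTop p a).take 15) (s.take 15)
        = (L.foldl (fun a p => pvInsertTop p a) s).take 15 := by
  induction L with
  | nil => intro s; simp
  | cons p t ih =>
    intro s
    simp only [List.foldl_cons]
    rw [pvInsertTop_take p s 15]
    exact ih (pvInsertTop p s)

-- on an item whose code differs from every code in the list, pvInsertTop is
-- exactly sorted2's insertBy for the key (-count, code)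
theorem pvInsertTop_eq_insertBy (p : String × Int) :
    ∀ (s : List (String × Int)), (∀ q ∈ s, q.1 ≠ p.1) →
      pvInsertTop p s = PySem.List.insertBy pvBefore p s := by
  intro s
  induction s with
  | nil => intro _; rfl
  | cons h t ih =>
    intro hf
    have hne : h.1 ≠ p.1 := hf h (by simp)
    have hiff : pvBefore p h = true ↔ ¬(h.2 > p.2 ∨ (h.2 = p.2 ∧ h.1 < p.1)) := by
      simp only [pvBefore, Bool.or_eq_true, Bool.and_eq_true, Bool.not_eq_true',
        decide_eq_true_eq, decide_eq_false_iff_not]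
      constructor
      · rintro (hv | ⟨hv1, hv2⟩) <;> rintro (h' | ⟨h', h''⟩)
        · omega
        · omega
        · omega
        · exact absurd hv2 (lt_asymm h'')
      · intro hnc
        rcases lt_trichotomy h.2 p.2 with hv | hv | hv
        · left; omega
        · right
          refine ⟨by omega, ?_⟩
          rcases lt_trichotomy h.1 p.1 with hs | hs | hs
          · exact absurd (Or.inr ⟨hv, hs⟩) hnc
          · exact absurd hs hne
          · exact hs
        · exact absurd (Or.inl hv) hnc
    by_cases hc : h.2 > p.2 ∨ (h.2 = p.2 ∧ h.1 < p.1)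
    · have hb : pvBefore p h = false := by
        simp only [Bool.eq_false_iff]
        exact fun hx => (hiff.mp hx) hc
      rw [pvInsertTop_cons, if_pos hc, pvInsertBy_cons, hb]
      simp [ih (fun q hq => hf q (by simp [hq]))]
    · have hb : pvBefore p h = true := hiff.mpr hc
      rw [pvInsertTop_cons, if_neg hc, pvInsertBy_cons, hb]
      simp

-- over a list with all-distinct codes, the insertion fold is sorted2's fold
theorem pvFold_eq_sorted2_fold (L : List (String × Int)) :
    ∀ (s : List (String × Int)),
      (∀ p ∈ L, ∀ q ∈ s, q.1 ≠ p.1) → (L.map Prod.fst).Nodup →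
      L.foldl (fun a p => pvInsertTop p a) s
        = L.foldl (fun a p => PySem.List.insertBy pvBefore p a) s := by
  induction L with
  | nil => intro s _ _; simp
  | cons p t ih =>
    intro s hf hnd
    simp only [List.foldl_cons]
    rw [pvInsertTop_eq_insertBy p s (hf p (by simp))]
    apply ih
    · intro r hr q hq
      rw [PySem.List.mem_insertBy] at hq
      rcases hq with rfl | hq
      · simp only [List.map_cons, List.nodup_cons] at hnd
        intro hqe
        exact hnd.1 (hqe ▸ List.mem_map_of_mem hr)
      · exact hf r (by simp [hr]) q hq
    · simp only [List.map_cons, List.nodup_cons] at hnd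
      exact hnd.2

theorem pvSorted2_eq_fold (L : List (String × Int)) :
    PySem.List.sorted2 L (fun it => -it.2) (fun it => it.1)
      = L.foldl (fun a p => PySem.List.insertBy pvBefore p a) [] := by
  simp only [PySem.List.sorted2]
  rfl

-- appending line-by-line is the map
theorem pvLines_foldl (l : List (String × Int)) (init : List String) :
    l.foldl (fun acc p => acc ++ ["- `" ++ p.1 ++ "`: " ++ PySem.Int.toStr p.2]) init
      = init ++ l.map (fun p => "- `" ++ p.1 ++ "`: " ++ PySem.Int.toStr p.2) := by
  induction l generalizing init with
  | nil => simp
  | cons h t ih => simp [ih]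

-- ===== VERDICT (by name: the statement is the Claim_ definition above) =====
theorem snapshot_code_lines_py_spec : Claim_equal_snapshot_code_lines_py := by
  intro snapshot _
  unfold Spec_snapshot_code_lines_py
  unfold snapshot_code_lines_py snapshot_code_lines_py_alt
  simp only [coerce_int_py]
  set d := ensure_mapping_py snapshot with hd
  by_cases hemp : d.items = []
  · simp [hemp]
  · simp only [if_neg hemp]
    -- sortable = d.items
    have hsortable : d.items.foldl
        (fun acc p => acc ++ [(p.1, p.2)]) ([] : List (String × Int)) = d.items := by
      rw [PySem.List.foldl_append_singleton_eq_map]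
      simp
    rw [hsortable]
    have hnd : (d.items.map Prod.fst).Nodup := by
      have := PySem.Dict.nodup_keys_ofList (snapshot.getD [])
      simpa [hd, ensure_mapping_py, PySem.Dict.keys] using this
    have hsortnil : PySem.List.sorted2 d.items (fun it => -it.2) (fun it => it.1) ≠ [] := by
      intro hx
      have hp := PySem.List.sorted2_perm d.items (fun it => -it.2) (fun it => it.1) false
      rw [hx] at hp
      exact hemp hp.nil_eq.symm
    rw [if_neg hsortnil]
    rw [pvLines_foldl]
    congr 1
    -- the selected lists agree
    rw [pvSorted2_eq_fold]
    rw [← pvFold_eq_sorted2_fold d.items [] (by intro p _ q hq; simp at hq) hnd]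
    rw [show ([] : List (String × Int)) = List.take 15 [] from rfl, pvFold_take]
    rw [PySem.List.slice_to _ (by norm_num : (0:Int) ≤ 15)]
    rfl
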